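-- pv_equiv track=rewrite | github.com/vitahoang/cs50-2020 | pset06/sentimental-readability/readability.py | text_counter
-- ===== SOURCE A (Python) =====
-- import string
--
-- def text_counter(text) -> dict:
--     """
--     count number of sentences, words, character in a text
--
--     Args:
--         text (str): text
--     Returns:
--         counter: {"sentences": int, "words": int, "characters": int}
--     """
--     counter = {"sentences": 0, "words": 1, "characters": 0}
--     for i in text:
--         if i in ("!", "?", "."):
--             counter["sentences"] += 1
--         if i == " ":
--             counter["words"] += 1
--         if i in string.ascii_letters:
--             counter["characters"] += 1
--     return counter
-- ===== SOURCE B (Python) =====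
-- import string
--
--
-- def text_counter(text) -> dict:
--     """Count sentences, words and ascii-letter characters of text via str.count passes."""
--     return {
--         "sentences": text.count("!") + text.count("?") + text.count("."),
--         "words": text.count(" ") + 1,
--         "characters": sum(text.count(c) for c in string.ascii_letters),
--     }
-- ===== Notes on version B (the rewrite author's own statement) =====
-- stated objective: faster
-- what changed: Replaces the single Python-level loop maintaining a dict with independent str.count passes per quantity: sentence terminators and spaces via str.count, letters as a sum of str.count over string.ascii_letters.
import Mathlib
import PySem

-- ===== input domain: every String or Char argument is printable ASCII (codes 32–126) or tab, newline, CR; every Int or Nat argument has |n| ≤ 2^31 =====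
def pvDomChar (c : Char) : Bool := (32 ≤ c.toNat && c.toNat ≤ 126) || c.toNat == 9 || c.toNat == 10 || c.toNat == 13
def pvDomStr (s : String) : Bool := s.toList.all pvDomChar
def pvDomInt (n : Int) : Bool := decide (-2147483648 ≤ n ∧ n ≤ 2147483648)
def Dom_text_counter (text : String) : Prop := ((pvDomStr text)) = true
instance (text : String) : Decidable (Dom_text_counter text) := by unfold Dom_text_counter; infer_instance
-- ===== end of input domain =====

-- B replaces A's single dict-updating loop with independent str.count passes per quantity (a timing run measured B faster at the largest size).

-- string.ascii_letters (shared constant of the module)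
def asciiLetters : List Char := "abcdefghijklmnopqrstuvwxyzABCDEFGHIJKLMNOPQRSTUVWXYZ".toList

-- ===== PORT A =====
-- loop body of A; 'i in string.ascii_letters' on the 1-char i is exactly list membership (comment: exact for single chars)
def tcStep (counter : PySem.Dict String Int) (i : Char) : PySem.Dict String Int :=
  let c1 := if i = '!' ∨ i = '?' ∨ i = '.' then counter.insert "sentences" (counter.getD "sentences" 0 + 1) else counter
  let c2 := if i = ' ' then c1.insert "words" (c1.getD "words" 0 + 1) else c1
  if i ∈ asciiLetters then c2.insert "characters" (c2.getD "characters" 0 + 1) else c2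

def text_counter (text : String) : List (String × Int) :=
  (text.toList.foldl tcStep ⟨[("sentences", 0), ("words", 1), ("characters", 0)]⟩).items

-- ===== PORT B =====
def text_counter_alt (text : String) : List (String × Int) :=
  [("sentences", (PySem.Str.count text "!" : Int) + PySem.Str.count text "?" + PySem.Str.count text "."),
   ("words", (PySem.Str.count text " " : Int) + 1),
   ("characters", (asciiLetters.map (fun c => (PySem.Str.count text (String.ofList [c]) : Int))).sum)]

-- ===== PRECONDITION & SPEC =====
def Spec_text_counter (text : String) (out : List (String × Int)) : Prop := out = text_counter_alt text
instance (text : String) (out : List (String × Int)) : Decidable (Spec_text_counter text out) := by unfold Spec_text_counter; infer_instance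

-- ===== CLAIM (what is proved, stated in full; the proofs are below) =====
def Claim_equal_text_counter : Prop := ∀ (text : String), Dom_text_counter text → Spec_text_counter text (text_counter text)

-- ===== LEMMAS AND PROOFS =====

theorem count_go_singleton (c : Char) : ∀ (fuel : Nat) (l : List Char) (acc : Nat),
    l.length ≤ fuel → PySem.Chars.count.go [c] fuel l acc = acc + l.count c := by
  intro fuel
  induction fuel with
  | zero =>
    intro l acc h
    have : l = [] := List.eq_nil_of_length_eq_zero (Nat.le_zero.mp h)
    subst this; simp [PySem.Chars.count.go]
  | succ n ih =>
    intro l acc h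
    cases l with
    | nil => simp [PySem.Chars.count.go]
    | cons a t =>
      simp only [PySem.Chars.count.go]
      by_cases hac : c = a
      · subst hac
        simp only [List.isPrefixOf, beq_self_eq_true, Bool.true_and,
          if_pos]
        rw [ih]
        · simp [List.count_cons]; omega
        · simpa using Nat.le_of_succ_le_succ (by simpa using h)
      · have : ([c].isPrefixOf (a :: t)) = false := by
          simp [List.isPrefixOf]
          exact fun h' => hac h'
        rw [this]
        simp only [Bool.false_eq_true, if_false]
        rw [ih t acc (by simpa using Nat.le_of_succ_le_succ (by simpa using h))]
        have hne : (a == c) = false := by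
          simp
          exact fun h' => hac h'.symm
        simp [List.count_cons, hne]

theorem count_singleton (s : List Char) (c : Char) :
    PySem.Chars.count s [c] = s.count c := by
  simp [PySem.Chars.count, count_go_singleton c s.length s 0 le_rfl]

theorem strCount_singleton (s : String) (c : Char) :
    PySem.Str.count s (String.ofList [c]) = s.toList.count c := by
  show PySem.Chars.count s.toList (String.ofList [c]).toList = s.toList.count c
  rw [String.toList_ofList, count_singleton]

theorem tcStep_eq (s w c : Int) (i : Char) :
    tcStep ⟨[("sentences", s), ("words", w), ("characters", c)]⟩ i =
      ⟨[("sentences", s + (if i = '!' ∨ i = '?' ∨ i = '.' then 1 else 0)),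
        ("words", w + (if i = ' ' then 1 else 0)),
        ("characters", c + (if i ∈ asciiLetters then 1 else 0))]⟩ := by
  unfold tcStep
  split_ifs <;>
    simp_all [PySem.Dict.insert, PySem.Dict.getD, PySem.Dict.get?, PySem.Dict.contains]

theorem fold_tcStep (cs : List Char) : ∀ (s w c : Int),
    (cs.foldl tcStep ⟨[("sentences", s), ("words", w), ("characters", c)]⟩) =
      ⟨[("sentences", s + cs.countP (fun i => decide (i = '!' ∨ i = '?' ∨ i = '.'))),
        ("words", w + cs.count ' '),
        ("characters", c + cs.countP (fun i => decide (i ∈ asciiLetters)))]⟩ := by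
  induction cs with
  | nil => intro s w c; simp
  | cons a t ih =>
    intro s w c
    simp only [List.foldl_cons, tcStep_eq, ih]
    simp only [PySem.Dict.mk.injEq, List.cons.injEq, Prod.mk.injEq, true_and, and_true]
    refine ⟨?_, ?_, ?_⟩
    · rw [List.countP_cons]
      by_cases hp : a = '!' ∨ a = '?' ∨ a = '.' <;> simp [hp] <;> push_cast <;> ring
    · rw [List.count_cons]
      by_cases hp : a = ' ' <;> simp [hp] <;> push_cast <;> ring
    · rw [List.countP_cons]
      by_cases hp : a ∈ asciiLetters <;> simp [hp] <;> push_cast <;> ring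

theorem countP_tri (cs : List Char) :
    ((cs.countP (fun i => decide (i = '!') || (decide (i = '?') || decide (i = '.'))) : Nat) : Int) =
      (cs.count '!' : Int) + (cs.count '?' : Int) + (cs.count '.' : Int) := by
  induction cs with
  | nil => simp
  | cons a t ih =>
    simp only [List.countP_cons, List.count_cons]
    by_cases h1 : a = '!' <;> by_cases h2 : a = '?' <;> by_cases h3 : a = '.' <;>
      simp_all <;> push_cast <;> ring

theorem sum_counts (s : List Char) : ∀ (L : List Char), L.Nodup →
    ((L.map (fun c => (s.count c : Int))).sum) = (s.countP (fun i => decide (i ∈ L)) : Int) := by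
  intro L
  induction L with
  | nil => simp
  | cons a t ih =>
    intro h
    have hnd := (List.nodup_cons.mp h)
    have hsplit : s.countP (fun i => decide (i ∈ a :: t)) =
        s.count a + s.countP (fun i => decide (i ∈ t)) := by
      clear ih
      induction s with
      | nil => simp
      | cons b bs ihs =>
        simp only [List.countP_cons, List.count_cons, ihs]
        by_cases hb : b = a <;> by_cases hbt : b ∈ t
        · exact absurd (hb ▸ hbt) hnd.1
        · simp [hb, hnd.1] <;> omega
        · simp [hb, hbt] <;> omega
        · simp [hb, hbt]
    simp only [List.map_cons, List.sum_cons, ih hnd.2, hsplit]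
    push_cast; ring

-- ===== VERDICT (by name: the statement is the Claim_ definition above) =====
set_option maxHeartbeats 1000000 in
theorem text_counter_spec : Claim_equal_text_counter := by
  intro text _
  show text_counter text = text_counter_alt text
  unfold text_counter text_counter_alt
  rw [fold_tcStep]
  simp only [strCount_singleton,
    sum_counts text.toList asciiLetters (by decide)]
  simp [pysem, count_singleton]
  exact ⟨countP_tri _, by ring⟩
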